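-- pv_equiv track=rewrite | github.com/DecawDevonn/open-claw | agents/email_agent.py | _parse_request
-- ===== SOURCE A (Python) =====
-- def _parse_request(content: str):
--     """Minimal intent parser — replace with NLP for production use."""
--     lines = [ln.strip() for ln in content.splitlines() if ln.strip()]
--     to = "unknown@example.com"
--     subject = "OpenClaw automated message"
--     body = content
--     for line in lines:
--         lower = line.lower()
--         if lower.startswith("to:"):
--             to = line[3:].strip()
--         elif lower.startswith("subject:"):
--             subject = line[8:].strip()
--     return to, subject, body
-- ===== SOURCE B (Python) =====
-- def _parse_request(content: str):
--     headers = {}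
--     for raw in content.splitlines():
--         line = raw.strip()
--         if line and ':' in line:
--             key, _, value = line.partition(':')
--             headers[key.lower()] = value.strip()
--     return (headers.get('to', 'unknown@example.com'),
--             headers.get('subject', 'OpenClaw automated message'),
--             content)
-- ===== Notes on version B (the rewrite author's own statement) =====
-- stated objective: idiomatic
-- what changed: B parses every line once into a last-wins header dict keyed by the lowercased text before the first colon, then reads the recipient and subject headers out of it with defaults, instead of A's per-header prefix tests with two mutable accumulators.
import Mathlib
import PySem

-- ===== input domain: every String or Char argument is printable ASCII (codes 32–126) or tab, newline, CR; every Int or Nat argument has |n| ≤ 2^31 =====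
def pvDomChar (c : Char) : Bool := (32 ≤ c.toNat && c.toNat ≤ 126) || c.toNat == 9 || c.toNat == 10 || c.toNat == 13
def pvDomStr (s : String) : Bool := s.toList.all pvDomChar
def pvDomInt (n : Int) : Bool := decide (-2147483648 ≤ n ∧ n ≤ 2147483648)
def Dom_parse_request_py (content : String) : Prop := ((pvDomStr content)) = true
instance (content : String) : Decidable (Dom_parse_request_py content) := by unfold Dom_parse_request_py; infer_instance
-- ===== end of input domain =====

-- B replaces A's per-header prefix tests by a single header-dict pass (each line split at its
-- first colon, last value wins) with defaulted lookups afterwards; objective: idiomatic.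

-- ===== PORT A =====
-- the body of A's for-loop, as a named step function
def pvAStep (st : String × String) (line : String) : String × String :=
  let lower := PySem.Str.lower line
  if PySem.Str.startswith lower "to:" then
    (PySem.Str.strip (PySem.Str.slice line (some 3) none), st.2)
  else if PySem.Str.startswith lower "subject:" then
    (st.1, PySem.Str.strip (PySem.Str.slice line (some 8) none))
  else st

def parse_request_py (content : String) : String × String × String :=
  let lines := ((PySem.Str.splitlines content).filter
      (fun ln => PySem.Str.strip ln != "")).map PySem.Str.strip
  let st := lines.foldl pvAStep ("unknown@example.com", "OpenClaw automated message")
  (st.1, st.2, content)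

-- ===== PORT B =====
-- line.partition(':') for the one-char separator ':' — exact: (part before the first ':',
-- part after it); the middle component is implied by the branch that calls it.
def pyPartitionColon (line : String) : String × String :=
  (String.ofList (line.toList.takeWhile (fun c => c ≠ ':')),
   String.ofList ((line.toList.dropWhile (fun c => c ≠ ':')).drop 1))

-- the body of B's for-loop, as a named step function
def pvBStep (d : PySem.Dict String String) (raw : String) : PySem.Dict String String :=
  let line := PySem.Str.strip raw
  if line != "" && PySem.Str.isIn ":" line then
    let kv := pyPartitionColon line
    d.insert (PySem.Str.lower kv.1) (PySem.Str.strip kv.2)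
  else d

def parse_request_py_alt (content : String) : String × String × String :=
  let headers := (PySem.Str.splitlines content).foldl pvBStep PySem.Dict.empty
  (headers.getD "to" "unknown@example.com",
   headers.getD "subject" "OpenClaw automated message",
   content)

-- ===== PRECONDITION & SPEC =====
def Spec_parse_request_py (content : String) (out : String × String × String) : Prop := out = parse_request_py_alt content
instance (content : String) (out : String × String × String) : Decidable (Spec_parse_request_py content out) := by unfold Spec_parse_request_py; infer_instance

-- ===== CLAIM (what is proved, stated in full; the proofs are below) =====
def Claim_equal_parse_request_py : Prop := ∀ (content : String), Dom_parse_request_py content → Spec_parse_request_py content (parse_request_py content)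

-- ===== LEMMAS AND PROOFS =====

-- A's two loop accumulators, read off B's header dict
def pvView (d : PySem.Dict String String) : String × String :=
  (d.getD "to" "unknown@example.com", d.getD "subject" "OpenClaw automated message")

theorem lc_colon (c : Char) : PySem.Chars.lowerChar c = ':' ↔ c = ':' := by
  unfold PySem.Chars.lowerChar PySem.Chars.isupper
  by_cases h : ('A' ≤ c ∧ c ≤ 'Z')
  · have h1 : 65 ≤ c.toNat := h.1
    have h2 : c.toNat ≤ 90 := h.2
    simp only [h.1, h.2, decide_true, Bool.and_self, if_true]
    constructor
    · intro hc
      have ht : (Char.ofNat (c.toNat + 32)).toNat = 58 := by rw [hc]; rfl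
      have hv : (c.toNat + 32).isValidChar := Or.inl (by omega)
      rw [Char.toNat_ofNat, if_pos hv] at ht
      omega
    · intro hc; subst hc; simp at h1
  · have : ¬ ('A' ≤ c) ∨ ¬ (c ≤ 'Z') := by tauto
    rcases this with h' | h' <;> simp [h']

lemma ne_colon_of_lower {c t : Char} (h : PySem.Chars.lowerChar c = t) (ht : t ≠ ':') : c ≠ ':' := by
  intro hc; exact ht (by rw [← h, hc, (lc_colon ':').mpr rfl])

theorem decomp_to (cs : List Char) (h : PySem.Chars.startswith (PySem.Chars.lower cs) "to:".toList = true) :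
    ∃ c0 c1 rest, cs = c0 :: c1 :: ':' :: rest ∧ PySem.Chars.lowerChar c0 = 't' ∧ PySem.Chars.lowerChar c1 = 'o' := by
  unfold PySem.Chars.startswith PySem.Chars.lower at h
  rcases cs with _|⟨c0,_|⟨c1,_|⟨c2,rest⟩⟩⟩ <;> simp_all [List.isPrefixOf, List.map_cons]
  exact ⟨(lc_colon c2).mp h.2.2.symm, h.1.symm, h.2.1.symm⟩

theorem decomp_subject (cs : List Char) (h : PySem.Chars.startswith (PySem.Chars.lower cs) "subject:".toList = true) :
    ∃ c0 c1 c2 c3 c4 c5 c6 rest, cs = c0 :: c1 :: c2 :: c3 :: c4 :: c5 :: c6 :: ':' :: rest ∧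
      PySem.Chars.lower [c0,c1,c2,c3,c4,c5,c6] = "subject".toList := by
  unfold PySem.Chars.startswith PySem.Chars.lower at h
  rcases cs with _|⟨c0,_|⟨c1,_|⟨c2,_|⟨c3,_|⟨c4,_|⟨c5,_|⟨c6,_|⟨c7,rest⟩⟩⟩⟩⟩⟩⟩⟩ <;> simp_all [List.isPrefixOf, List.map_cons]
  refine ⟨(lc_colon c7).mp h.2.2.2.2.2.2.2.symm, ?_⟩
  simp [PySem.Chars.lower, h.1.symm, h.2.1.symm, h.2.2.1.symm, h.2.2.2.1.symm, h.2.2.2.2.1.symm, h.2.2.2.2.2.1.symm, h.2.2.2.2.2.2.1.symm]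

lemma branch_to (s : String) (d : PySem.Dict String String) (c0 c1 : Char) (rest : List Char)
    (hcs : s.toList = c0 :: c1 :: ':' :: rest)
    (h0 : PySem.Chars.lowerChar c0 = 't') (h1 : PySem.Chars.lowerChar c1 = 'o') :
    (PySem.Str.strip (PySem.Str.slice s (some 3) none), (pvView d).2)
      = pvView (d.insert (PySem.Str.lower (pyPartitionColon s).1)
                         (PySem.Str.strip (pyPartitionColon s).2)) := by
  have hc0 : c0 ≠ ':' := ne_colon_of_lower h0 (by decide)
  have hc1 : c1 ≠ ':' := ne_colon_of_lower h1 (by decide)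
  have hslice : (PySem.Str.slice s (some 3) none).toList = rest := by
    simp only [PySem.Str.slice, String.toList_ofList, PySem.Chars.slice_eq_listSlice, hcs]
    rw [PySem.List.slice_from _ (by omega : (0:Int) ≤ 3)]
    rfl
  have hkey : PySem.Str.lower (pyPartitionColon s).1 = "to" := by
    simp only [pyPartitionColon, hcs]
    rw [List.takeWhile_cons_of_pos (by simpa using hc0), List.takeWhile_cons_of_pos (by simpa using hc1),
        List.takeWhile_cons_of_neg (by simp)]
    simp [PySem.Str.lower, PySem.Chars.lower, h0, h1]
  have hval : (pyPartitionColon s).2 = String.ofList rest := by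
    simp only [pyPartitionColon, hcs]
    rw [List.dropWhile_cons_of_pos (by simpa using hc0), List.dropWhile_cons_of_pos (by simpa using hc1),
        List.dropWhile_cons_of_neg (by simp)]
    rfl
  rw [hkey, hval]
  unfold pvView
  rw [PySem.Dict.getD_insert, PySem.Dict.getD_insert]
  simp only [if_neg (by decide : ¬("subject" = "to"))]
  exact Prod.ext (by simp [PySem.Str.strip, hslice]) rfl

lemma branch_subject (s : String) (d : PySem.Dict String String) (c0 c1 c2 c3 c4 c5 c6 : Char) (rest : List Char)
    (hcs : s.toList = c0 :: c1 :: c2 :: c3 :: c4 :: c5 :: c6 :: ':' :: rest)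
    (hlow : PySem.Chars.lower [c0,c1,c2,c3,c4,c5,c6] = "subject".toList) :
    ((pvView d).1, PySem.Str.strip (PySem.Str.slice s (some 8) none))
      = pvView (d.insert (PySem.Str.lower (pyPartitionColon s).1)
                         (PySem.Str.strip (pyPartitionColon s).2)) := by
  rw [show "subject".toList = ['s','u','b','j','e','c','t'] by decide] at hlow
  simp only [PySem.Chars.lower, List.map_cons, List.map_nil, List.cons.injEq, and_true] at hlow
  obtain ⟨h0, h1, h2, h3, h4, h5, h6⟩ := hlow
  have hc0 : c0 ≠ ':' := ne_colon_of_lower h0 (by decide)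
  have hc1 : c1 ≠ ':' := ne_colon_of_lower h1 (by decide)
  have hc2 : c2 ≠ ':' := ne_colon_of_lower h2 (by decide)
  have hc3 : c3 ≠ ':' := ne_colon_of_lower h3 (by decide)
  have hc4 : c4 ≠ ':' := ne_colon_of_lower h4 (by decide)
  have hc5 : c5 ≠ ':' := ne_colon_of_lower h5 (by decide)
  have hc6 : c6 ≠ ':' := ne_colon_of_lower h6 (by decide)
  have hslice : (PySem.Str.slice s (some 8) none).toList = rest := by
    simp only [PySem.Str.slice, String.toList_ofList, PySem.Chars.slice_eq_listSlice, hcs]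
    rw [PySem.List.slice_from _ (by omega : (0:Int) ≤ 8)]
    rfl
  have hkey : PySem.Str.lower (pyPartitionColon s).1 = "subject" := by
    simp only [pyPartitionColon, hcs]
    rw [List.takeWhile_cons_of_pos (by simpa using hc0), List.takeWhile_cons_of_pos (by simpa using hc1),
        List.takeWhile_cons_of_pos (by simpa using hc2), List.takeWhile_cons_of_pos (by simpa using hc3),
        List.takeWhile_cons_of_pos (by simpa using hc4), List.takeWhile_cons_of_pos (by simpa using hc5),
        List.takeWhile_cons_of_pos (by simpa using hc6), List.takeWhile_cons_of_neg (by simp)]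
    simp [PySem.Str.lower, PySem.Chars.lower, h0, h1, h2, h3, h4, h5, h6]
  have hval : (pyPartitionColon s).2 = String.ofList rest := by
    simp only [pyPartitionColon, hcs]
    rw [List.dropWhile_cons_of_pos (by simpa using hc0), List.dropWhile_cons_of_pos (by simpa using hc1),
        List.dropWhile_cons_of_pos (by simpa using hc2), List.dropWhile_cons_of_pos (by simpa using hc3),
        List.dropWhile_cons_of_pos (by simpa using hc4), List.dropWhile_cons_of_pos (by simpa using hc5),
        List.dropWhile_cons_of_pos (by simpa using hc6), List.dropWhile_cons_of_neg (by simp)]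
    rfl
  rw [hkey, hval]
  unfold pvView
  rw [PySem.Dict.getD_insert, PySem.Dict.getD_insert]
  simp only [if_neg (by decide : ¬("to" = "subject"))]
  exact Prod.ext rfl (by simp [PySem.Str.strip, hslice])

lemma branch_other (s : String) (d : PySem.Dict String String)
    (hto : PySem.Str.startswith (PySem.Str.lower s) "to:" = false)
    (hsub : PySem.Str.startswith (PySem.Str.lower s) "subject:" = false)
    (hin : PySem.Str.isIn ":" s = true) :
    pvView d = pvView (d.insert (PySem.Str.lower (pyPartitionColon s).1)
                                (PySem.Str.strip (pyPartitionColon s).2)) := by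
  have hmem : ':' ∈ s.toList := by
    rw [PySem.Str.isIn_iff_infix] at hin
    have : ':' ∈ ":".toList := by decide
    exact List.IsInfix.mem this hin
  have hdw : s.toList.dropWhile (fun c => c ≠ ':') ≠ [] := by
    intro h
    have := List.dropWhile_eq_nil_iff.mp h ':' hmem
    simp at this
  have hhead : (s.toList.dropWhile (fun c => c ≠ ':')).head hdw = ':' := by
    have := List.head_dropWhile_not (fun c => decide (c ≠ ':')) hdw
    simpa using this
  have hcs : s.toList = s.toList.takeWhile (fun c => c ≠ ':') ++
      ':' :: (s.toList.dropWhile (fun c => c ≠ ':')).tail := by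
    have hcons : s.toList.dropWhile (fun c => c ≠ ':') = ':' :: (s.toList.dropWhile (fun c => c ≠ ':')).tail := by
      conv_lhs => rw [← List.cons_head_tail hdw]
      rw [hhead]
    conv_lhs => rw [← List.takeWhile_append_dropWhile (p := fun c => decide (c ≠ ':')) (l := s.toList)]
    conv_lhs => rw [hcons]
  have hkto : PySem.Str.lower (pyPartitionColon s).1 ≠ "to" := by
    intro hk
    have h2 : PySem.Chars.lower (s.toList.takeWhile (fun c => c ≠ ':')) = "to".toList := by
      have := congrArg String.toList hk
      simpa [PySem.Str.lower, pyPartitionColon] using this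
    rw [show "to".toList = ['t','o'] by decide] at h2
    rcases hpre : s.toList.takeWhile (fun c => c ≠ ':') with _|⟨a,_|⟨b,_|⟨c,tl0⟩⟩⟩ <;>
      rw [hpre] at h2 <;> simp [PySem.Chars.lower] at h2
    rw [hpre] at hcs
    have : PySem.Str.startswith (PySem.Str.lower s) "to:" = true := by
      simp only [PySem.Str.startswith, PySem.Str.lower, String.toList_ofList, PySem.Chars.startswith]
      rw [show PySem.Chars.lower s.toList = List.map PySem.Chars.lowerChar s.toList from rfl, hcs]
      simp [h2.1, h2.2, List.isPrefixOf, (lc_colon ':').mpr rfl, show "to:".toList = ['t','o',':'] by decide]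
    rw [this] at hto; exact absurd hto (by simp)
  have hksub : PySem.Str.lower (pyPartitionColon s).1 ≠ "subject" := by
    intro hk
    have h2 : PySem.Chars.lower (s.toList.takeWhile (fun c => c ≠ ':')) = "subject".toList := by
      have := congrArg String.toList hk
      simpa [PySem.Str.lower, pyPartitionColon] using this
    rw [show "subject".toList = ['s','u','b','j','e','c','t'] by decide] at h2
    rcases hpre : s.toList.takeWhile (fun c => c ≠ ':') with _|⟨a0,_|⟨a1,_|⟨a2,_|⟨a3,_|⟨a4,_|⟨a5,_|⟨a6,_|⟨a7,tl0⟩⟩⟩⟩⟩⟩⟩⟩ <;>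
      rw [hpre] at h2 <;> simp [PySem.Chars.lower] at h2
    rw [hpre] at hcs
    have : PySem.Str.startswith (PySem.Str.lower s) "subject:" = true := by
      simp only [PySem.Str.startswith, PySem.Str.lower, String.toList_ofList, PySem.Chars.startswith]
      rw [show PySem.Chars.lower s.toList = List.map PySem.Chars.lowerChar s.toList from rfl, hcs]
      simp [h2.1, h2.2.1, h2.2.2.1, h2.2.2.2.1, h2.2.2.2.2.1, h2.2.2.2.2.2.1, h2.2.2.2.2.2.2, List.isPrefixOf,
            (lc_colon ':').mpr rfl, show "subject:".toList = ['s','u','b','j','e','c','t',':'] by decide]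
    rw [this] at hsub; exact absurd hsub (by simp)
  unfold pvView
  rw [PySem.Dict.getD_insert, PySem.Dict.getD_insert,
      if_neg (fun h => hkto h.symm), if_neg (fun h => hksub h.symm)]

lemma pv_step (raw : String) (d : PySem.Dict String String) :
    (if PySem.Str.strip raw != "" then pvAStep (pvView d) (PySem.Str.strip raw) else pvView d)
      = pvView (pvBStep d raw) := by
  unfold pvBStep
  by_cases hempty : PySem.Str.strip raw = ""
  · rw [hempty]; simp
  · rw [if_pos (by simpa using hempty)]
    unfold pvAStep
    by_cases hto : PySem.Str.startswith (PySem.Str.lower (PySem.Str.strip raw)) "to:" = true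
    · obtain ⟨c0,c1,rest,hcs,h0,h1⟩ := decomp_to (PySem.Str.strip raw).toList
        (by simpa [PySem.Str.startswith, PySem.Str.lower, String.toList_ofList] using hto)
      have hin : PySem.Str.isIn ":" (PySem.Str.strip raw) = true := by
        rw [PySem.Str.isIn_iff_infix, hcs]
        exact ⟨[c0,c1], rest, by simp⟩
      have hin' : PySem.Chars.isIn [':'] (PySem.Chars.strip raw.toList) = true := by
        simpa [PySem.Str.isIn, PySem.Str.strip, show (":".toList)=[':'] by decide] using hin
      rw [if_pos hto, if_pos (by simp [hempty, hin'])]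
      exact branch_to _ d c0 c1 rest hcs h0 h1
    · by_cases hsub : PySem.Str.startswith (PySem.Str.lower (PySem.Str.strip raw)) "subject:" = true
      · obtain ⟨c0,c1,c2,c3,c4,c5,c6,rest,hcs,hlow⟩ := decomp_subject (PySem.Str.strip raw).toList
          (by simpa [PySem.Str.startswith, PySem.Str.lower, String.toList_ofList] using hsub)
        have hin : PySem.Str.isIn ":" (PySem.Str.strip raw) = true := by
          rw [PySem.Str.isIn_iff_infix, hcs]
          exact ⟨[c0,c1,c2,c3,c4,c5,c6], rest, by simp⟩
        have hin' : PySem.Chars.isIn [':'] (PySem.Chars.strip raw.toList) = true := by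
          simpa [PySem.Str.isIn, PySem.Str.strip, show (":".toList)=[':'] by decide] using hin
        rw [if_neg hto, if_pos hsub, if_pos (by simp [hempty, hin'])]
        exact branch_subject _ d c0 c1 c2 c3 c4 c5 c6 rest hcs hlow
      · rw [if_neg hto, if_neg hsub]
        by_cases hin : PySem.Str.isIn ":" (PySem.Str.strip raw) = true
        · have hin' : PySem.Chars.isIn [':'] (PySem.Chars.strip raw.toList) = true := by
            simpa [PySem.Str.isIn, PySem.Str.strip, show (":".toList)=[':'] by decide] using hin
          rw [if_pos (by simp [hempty, hin'])]
          exact branch_other _ d (by simpa using hto) (by simpa using hsub) hin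
        · have hin' : PySem.Chars.isIn [':'] (PySem.Chars.strip raw.toList) = false := by
            have := Bool.eq_false_iff.mpr (by simpa using hin)
            simpa [PySem.Str.isIn, PySem.Str.strip, show (":".toList)=[':'] by decide] using this
          rw [if_neg (by simp [hin'])]

lemma pv_loop (ls : List String) (d : PySem.Dict String String) :
    ls.foldl (fun st ln => if PySem.Str.strip ln != "" then pvAStep st (PySem.Str.strip ln) else st) (pvView d)
      = pvView (ls.foldl pvBStep d) := by
  induction ls generalizing d with
  | nil => rfl
  | cons l tl ih =>
    simp only [List.foldl_cons]
    rw [pv_step l d]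
    exact ih (pvBStep d l)

lemma pvA_fold_eq (ls : List String) (init : String × String) :
    ((ls.filter (fun ln => PySem.Str.strip ln != "")).map PySem.Str.strip).foldl pvAStep init
      = ls.foldl (fun st ln => if PySem.Str.strip ln != "" then pvAStep st (PySem.Str.strip ln) else st) init := by
  rw [List.foldl_map, List.foldl_filter]

-- ===== VERDICT (by name: the statement is the Claim_ definition above) =====
theorem parse_request_py_spec : Claim_equal_parse_request_py := by
  intro content _
  unfold Spec_parse_request_py parse_request_py parse_request_py_alt
  have h := pv_loop (PySem.Str.splitlines content) PySem.Dict.empty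
  rw [show pvView PySem.Dict.empty = ("unknown@example.com", "OpenClaw automated message") from rfl] at h
  simp only [pvA_fold_eq, h]
  rfl
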